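-- pv_equiv track=rewrite | github.com/Jongminfire/Programmers | Python/Level 2/압축 (구현).py | check
-- ===== SOURCE A (Python) =====
-- def check(msg, dic, msg_idx):
--     result = msg[msg_idx]
--     temp = ''
--
--     for i in range(msg_idx, len(msg)):
--         temp += msg[i]
--         if temp in dic:
--             result = temp
--
--     return result
-- ===== SOURCE B (Python) =====
-- def check(msg, dic, msg_idx):
--     for L in range(len(msg) - msg_idx, 0, -1):
--         cand = msg[msg_idx:msg_idx + L]
--         if cand in dic:
--             return cand
--     return msg[msg_idx]
-- ===== Notes on version B (the rewrite author's own statement) =====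
-- stated objective: alternative
-- what changed: B searches the candidate lengths from longest to shortest with slicing and an early return on the first dictionary hit, instead of A's incremental character-by-character prefix accumulation with last-match tracking.
-- outside the precondition, e.g. on check('abc', {'bca': 0}, -2): A returns 'bca', B returns 'b'
import Mathlib
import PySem

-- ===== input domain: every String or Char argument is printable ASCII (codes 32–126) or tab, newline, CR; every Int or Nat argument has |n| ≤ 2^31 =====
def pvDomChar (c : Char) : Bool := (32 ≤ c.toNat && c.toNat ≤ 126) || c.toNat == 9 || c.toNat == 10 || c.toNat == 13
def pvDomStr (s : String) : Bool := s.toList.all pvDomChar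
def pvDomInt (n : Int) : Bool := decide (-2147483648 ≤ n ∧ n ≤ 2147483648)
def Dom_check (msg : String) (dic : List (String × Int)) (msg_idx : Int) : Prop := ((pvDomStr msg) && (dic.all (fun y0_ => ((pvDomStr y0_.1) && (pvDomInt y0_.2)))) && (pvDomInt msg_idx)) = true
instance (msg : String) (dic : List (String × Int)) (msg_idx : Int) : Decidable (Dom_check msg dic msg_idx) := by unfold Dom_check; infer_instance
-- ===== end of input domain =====

-- B replaces A's incremental prefix accumulation with last-match tracking by a longest-first
-- scan over candidate lengths with early return (alternative decomposition, similar cost).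

-- ===== PORT A =====
-- A's loop body: temp += msg[i]; if temp in dic: result = temp   (state = (result, temp))
def checkStep (keys : List (List Char)) (st : List Char × List Char) (c : Char) : List Char × List Char :=
  let temp := st.2 ++ [c]
  if keys.contains temp then (temp, temp) else (st.1, temp)

def check (msg : String) (dic : List (String × Int)) (msg_idx : Int) : String :=
  let cs := msg.toList
  let keys := dic.map (fun p => p.1.toList)
  let result := [PySem.List.pyGetD cs msg_idx ' ']   -- msg[msg_idx]; in range under Pre_
  let st := (PySem.List.pyRange msg_idx (cs.length : Int) 1).foldl
    (fun st i => checkStep keys st (PySem.List.pyGetD cs i ' ')) (result, [])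
  String.ofList st.1

-- ===== PORT B =====
-- for L in range(len(msg)-msg_idx, 0, -1): if msg[msg_idx:msg_idx+L] in dic: return it
def checkAltGo (cs : List Char) (keys : List (List Char)) (msg_idx : Int) : List Int → Option (List Char)
  | [] => none
  | L :: rest =>
    let cand := PySem.List.slice cs (some msg_idx) (some (msg_idx + L))
    if keys.contains cand then some cand else checkAltGo cs keys msg_idx rest

def check_alt (msg : String) (dic : List (String × Int)) (msg_idx : Int) : String :=
  let cs := msg.toList
  let keys := dic.map (fun p => p.1.toList)
  match checkAltGo cs keys msg_idx (PySem.List.pyRange ((cs.length : Int) - msg_idx) 0 (-1)) with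
  | some cand => String.ofList cand
  | none => String.ofList [PySem.List.pyGetD cs msg_idx ' ']

-- ===== PRECONDITION & SPEC =====
-- Pre_ restricts to the natural domain 0 ≤ msg_idx < len(msg): outside [-len, len) the Python A
-- raises IndexError, and for -len ≤ msg_idx < 0 A's value arises from Python's negative-index
-- wraparound reading characters past the end of the string — an accident of Python indexing
-- outside the function's intended use, which B does not reproduce.
def Pre_check (msg : String) (dic : List (String × Int)) (msg_idx : Int) : Prop :=
  0 ≤ msg_idx ∧ msg_idx < msg.toList.length
instance (msg : String) (dic : List (String × Int)) (msg_idx : Int) : Decidable (Pre_check msg dic msg_idx) := by unfold Pre_check; infer_instance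
def pvWitness_check : String × (List (String × Int)) × Int := ("ab", [("ab", 0)], 0)

def Spec_check (msg : String) (dic : List (String × Int)) (msg_idx : Int) (out : String) : Prop := out = check_alt msg dic msg_idx
instance (msg : String) (dic : List (String × Int)) (msg_idx : Int) (out : String) : Decidable (Spec_check msg dic msg_idx out) := by unfold Spec_check; infer_instance

-- ===== CLAIM (what is proved, stated in full; the proofs are below) =====
def Claim_equal_check : Prop := ∀ (msg : String) (dic : List (String × Int)) (msg_idx : Int), Dom_check msg dic msg_idx → Pre_check msg dic msg_idx → Spec_check msg dic msg_idx (check msg dic msg_idx)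

-- ===== LEMMAS AND PROOFS =====

-- the longest L ≤ K with u.take L in keys (as that prefix), scanned downward
def downScan (keys : List (List Char)) (u : List Char) : Nat → Option (List Char)
  | 0 => none
  | K + 1 => if keys.contains (u.take (K + 1)) then some (u.take (K + 1)) else downScan keys u K

theorem downScan_append (keys : List (List Char)) (u : List Char) (c : Char) :
    ∀ K, K ≤ u.length → downScan keys (u ++ [c]) K = downScan keys u K := by
  intro K hK
  induction K with
  | zero => rfl
  | succ K ih =>
    have ht : (u ++ [c]).take (K + 1) = u.take (K + 1) :=
      List.take_append_of_le_length (by omega)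
    simp only [downScan, ht, ih (by omega)]

theorem foldA_eq (keys : List (List Char)) (r0 : List Char) (u : List Char) :
    u.foldl (checkStep keys) (r0, []) = ((downScan keys u u.length).getD r0, u) := by
  induction u using List.reverseRecOn with
  | nil => rfl
  | append_singleton u c ih =>
    rw [List.foldl_append, ih]
    have h2 : (u ++ [c]).length = u.length + 1 := by simp
    have h1 : (u ++ [c]).take (u.length + 1) = u ++ [c] := List.take_of_length_le (by simp)
    rw [h2]
    simp only [List.foldl, checkStep, downScan, h1, downScan_append keys u c u.length le_rfl]
    by_cases hc : u ++ [c] ∈ keys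
    · simp [hc]
    · simp [hc]

theorem altGo_eq (cs : List Char) (keys : List (List Char)) (i : Nat) :
    ∀ L : Nat, checkAltGo cs keys (i : Int) (PySem.List.pyRange (L : Int) 0 (-1)) =
      downScan keys (cs.drop i) L := by
  intro L
  induction L with
  | zero => rw [show ((0 : Nat) : Int) = 0 by rfl, PySem.List.pyRange_neg_one_eq_nil le_rfl]; rfl
  | succ L ih =>
    rw [PySem.List.pyRange_neg_one_cons (by exact_mod_cast Nat.succ_pos L)]
    have hstep : ((L + 1 : Nat) : Int) - 1 = (L : Int) := by push_cast; ring
    rw [hstep] at *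
    simp only [checkAltGo, PySem.List.slice_natCast_add, ih, downScan]

theorem check_spec : Claim_equal_check := by
  intro msg dic msg_idx _ hpre
  unfold Spec_check check check_alt
  obtain ⟨h0, hlt⟩ := hpre
  dsimp only
  have hidx : msg_idx = ((msg_idx.toNat : Nat) : Int) := (Int.toNat_of_nonneg h0).symm
  rw [PySem.List.foldl_pyRange_pyGetD' msg.toList ' ' (checkStep (dic.map (fun p => p.1.toList))) _ h0]
  rw [foldA_eq]
  have hlen : ((msg.toList.length : Int) - msg_idx) = ((msg.toList.length - msg_idx.toNat : Nat) : Int) := by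
    omega
  rw [hlen, hidx, altGo_eq, ← List.length_drop]
  simp only [Int.toNat_natCast]
  cases downScan (dic.map (fun p => p.1.toList)) (msg.toList.drop msg_idx.toNat)
      (msg.toList.drop msg_idx.toNat).length with
  | none => simp
  | some v => simp
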